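-- pv_equiv track=rewrite | github.com/AntonF-bu/Yabo | services/behavioral-mirror/extractor/ticker_resolver.py | _categorize_etf_risk
-- ===== SOURCE A (Python) =====
-- def _categorize_etf_risk(category: str, long_name: str) -> str:
--     """Categorize ETF risk level: low, medium, high, very_high."""
--     cat_lower = category.lower()
--     name_lower = long_name.lower()
--
--     if any(kw in cat_lower for kw in ["leverag", "inverse", "trading"]):
--         return "very_high"
--     if any(kw in name_lower for kw in ["3x", "2x", "ultra", "leverag", "inverse", "short"]):
--         return "very_high"
--
--     if any(kw in cat_lower for kw in [
--         "small", "micro", "emerging", "commodities", "precious metals", "biotech",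
--     ]):
--         return "high"
--
--     if any(kw in cat_lower for kw in [
--         "large blend", "large value", "s&p 500", "total market", "total stock",
--         "bond", "treasury", "fixed income", "money market",
--     ]):
--         return "low"
--
--     return "medium"
-- ===== SOURCE B (Python) =====
-- # Max-severity scoring: every keyword carries a numeric severity level; B scans all
-- # keywords, keeps the maximum matched level, and maps that level to a label.
-- _CAT_LEVELS = {
--     "leverag": 3, "inverse": 3, "trading": 3,
--     "small": 2, "micro": 2, "emerging": 2, "commodities": 2,
--     "precious metals": 2, "biotech": 2,
--     "large blend": 1, "large value": 1, "s&p 500": 1, "total market": 1,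
--     "total stock": 1, "bond": 1, "treasury": 1, "fixed income": 1,
--     "money market": 1,
-- }
-- _NAME_LEVELS = {"3x": 3, "2x": 3, "ultra": 3, "leverag": 3, "inverse": 3, "short": 3}
-- _LABELS = ("medium", "low", "high", "very_high")
--
--
-- def _categorize_etf_risk(category: str, long_name: str) -> str:
--     """Categorize ETF risk level: maximum severity over all matched keywords."""
--     cat = category.lower()
--     name = long_name.lower()
--     level = 0
--     for kw, lv in _CAT_LEVELS.items():
--         if kw in cat and lv > level:
--             level = lv
--     for kw, lv in _NAME_LEVELS.items():
--         if kw in name and lv > level: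
--             level = lv
--     return _LABELS[level]
-- ===== Notes on version B (the rewrite author's own statement) =====
-- stated objective: alternative
-- what changed: Replaces A's ordered early-return branch cascade with max-severity scoring: each keyword carries a numeric level (3/2/1), B scans all keywords accumulating the maximum matched level, and indexes a label table by that level; equivalence holds because A's branch order coincides with decreasing severity.
import Mathlib
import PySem

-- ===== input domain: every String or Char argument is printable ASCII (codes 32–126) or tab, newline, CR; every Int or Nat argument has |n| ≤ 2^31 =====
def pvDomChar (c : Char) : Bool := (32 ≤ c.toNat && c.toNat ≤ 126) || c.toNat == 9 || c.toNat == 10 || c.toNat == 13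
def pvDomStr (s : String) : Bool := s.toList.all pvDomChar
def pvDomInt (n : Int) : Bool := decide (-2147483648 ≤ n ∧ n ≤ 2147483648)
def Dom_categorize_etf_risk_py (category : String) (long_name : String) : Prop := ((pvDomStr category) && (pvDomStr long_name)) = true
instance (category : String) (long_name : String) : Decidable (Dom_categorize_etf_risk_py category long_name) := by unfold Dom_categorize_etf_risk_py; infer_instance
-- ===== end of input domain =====

-- B replaces A's ordered early-return branch cascade with max-severity scoring over
-- per-keyword numeric levels plus a final label-table lookup (alternative structure).

-- ===== PORT A =====
def categorize_etf_risk_py (category : String) (long_name : String) : String :=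
  let cat_lower := PySem.Str.lower category
  let name_lower := PySem.Str.lower long_name
  if ["leverag", "inverse", "trading"].any (fun kw => PySem.Str.isIn kw cat_lower) then
    "very_high"
  else if ["3x", "2x", "ultra", "leverag", "inverse", "short"].any
      (fun kw => PySem.Str.isIn kw name_lower) then
    "very_high"
  else if ["small", "micro", "emerging", "commodities", "precious metals", "biotech"].any
      (fun kw => PySem.Str.isIn kw cat_lower) then
    "high"
  else if ["large blend", "large value", "s&p 500", "total market", "total stock",
      "bond", "treasury", "fixed income", "money market"].any
      (fun kw => PySem.Str.isIn kw cat_lower) then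
    "low"
  else
    "medium"

-- ===== PORT B =====
-- keyword → severity level tables (Python dicts in insertion order, iterated via .items())
def pvCatLevels : List (String × Int) :=
  [("leverag", 3), ("inverse", 3), ("trading", 3),
   ("small", 2), ("micro", 2), ("emerging", 2), ("commodities", 2),
   ("precious metals", 2), ("biotech", 2),
   ("large blend", 1), ("large value", 1), ("s&p 500", 1), ("total market", 1),
   ("total stock", 1), ("bond", 1), ("treasury", 1), ("fixed income", 1),
   ("money market", 1)]

def pvNameLevels : List (String × Int) :=
  [("3x", 3), ("2x", 3), ("ultra", 3), ("leverag", 3), ("inverse", 3), ("short", 3)]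

def pvLabels : List String := ["medium", "low", "high", "very_high"]

-- one loop iteration: 'if kw in text and lv > level: level = lv'
def pvStep (text : String) (level : Int) (p : String × Int) : Int :=
  if PySem.Str.isIn p.1 text && decide (p.2 > level) then p.2 else level

def categorize_etf_risk_py_alt (category : String) (long_name : String) : String :=
  let cat := PySem.Str.lower category
  let name := PySem.Str.lower long_name
  let level := pvNameLevels.foldl (pvStep name) (pvCatLevels.foldl (pvStep cat) 0)
  -- _LABELS[level]: level is always in {0,1,2,3}, so the IndexError case is unreachable
  (PySem.List.pyGet? pvLabels level).getD ""

-- ===== PRECONDITION & SPEC =====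
def Spec_categorize_etf_risk_py (category : String) (long_name : String) (out : String) : Prop := out = categorize_etf_risk_py_alt category long_name
instance (category : String) (long_name : String) (out : String) : Decidable (Spec_categorize_etf_risk_py category long_name out) := by unfold Spec_categorize_etf_risk_py; infer_instance

-- ===== CLAIM (what is proved, stated in full; the proofs are below) =====
def Claim_equal_categorize_etf_risk_py : Prop := ∀ (category : String) (long_name : String), Dom_categorize_etf_risk_py category long_name → Spec_categorize_etf_risk_py category long_name (categorize_etf_risk_py category long_name)

-- ===== LEMMAS AND PROOFS =====

-- folding pvStep over keywords that all carry the same level lv is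
-- 'bump the accumulator to lv if any keyword matches and lv is larger'
theorem pvFoldl_const_lv (text : String) (lv : Int) (kws : List String) (acc : Int) :
    List.foldl (pvStep text) acc (kws.map (fun k => (k, lv)))
      = if kws.any (fun kw => PySem.Str.isIn kw text) && decide (lv > acc) then lv else acc := by
  induction kws generalizing acc with
  | nil => simp
  | cons k ks ih =>
    simp only [List.map, List.foldl, List.any, pvStep, ih]
    by_cases hm : PySem.Str.isIn k text = true <;>
      by_cases ha : lv > acc <;>
      simp [PySem.Str.isIn] at hm <;>
      simp [hm, ha]

theorem pvCatLevels_eq :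
    pvCatLevels = (["leverag", "inverse", "trading"].map (fun k => (k, (3 : Int))))
      ++ (["small", "micro", "emerging", "commodities", "precious metals", "biotech"].map
            (fun k => (k, (2 : Int))))
      ++ (["large blend", "large value", "s&p 500", "total market", "total stock",
           "bond", "treasury", "fixed income", "money market"].map (fun k => (k, (1 : Int)))) := by
  rfl

theorem pvNameLevels_eq :
    pvNameLevels = (["3x", "2x", "ultra", "leverag", "inverse", "short"].map
      (fun k => (k, (3 : Int)))) := by
  rfl

-- ===== VERDICT (by name: the statement is the Claim_ definition above) =====
theorem categorize_etf_risk_py_spec : Claim_equal_categorize_etf_risk_py := by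
  intro category long_name _
  unfold Spec_categorize_etf_risk_py categorize_etf_risk_py categorize_etf_risk_py_alt
  rw [pvCatLevels_eq, pvNameLevels_eq]
  simp only [List.foldl_append, pvFoldl_const_lv]
  cases h1 : ["leverag", "inverse", "trading"].any
      (fun kw => PySem.Str.isIn kw (PySem.Str.lower category)) <;>
  cases h2 : ["3x", "2x", "ultra", "leverag", "inverse", "short"].any
      (fun kw => PySem.Str.isIn kw (PySem.Str.lower long_name)) <;>
  cases h3 : ["small", "micro", "emerging", "commodities", "precious metals", "biotech"].any
      (fun kw => PySem.Str.isIn kw (PySem.Str.lower category)) <;>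
  cases h4 : ["large blend", "large value", "s&p 500", "total market", "total stock",
      "bond", "treasury", "fixed income", "money market"].any
      (fun kw => PySem.Str.isIn kw (PySem.Str.lower category)) <;>
  simp [h1, h2, h3, h4, pvLabels, PySem.List.pyGet?, PySem.List.pyIdx?]
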